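-- pv_equiv track=rewrite | github.com/AtreuhLaicram/pyCode | palindrome_str v2.py | solution
-- ===== SOURCE A (Python) =====
-- def solution(st):
--     w = list(st)
--     i = 0
--     ale = len(w)
--     if 3 <= ale <= 10:
--         while w[:] != w[::-1]:
--             w.insert(len(w)-i, w[i])
--             i += 1
--         return "".join(w)
--     else:
--         return st
-- ===== SOURCE B (Python) =====
-- def solution(st):
--     if 3 <= len(st) <= 10:
--         for i in range(len(st)):
--             suf = st[i:]
--             if suf == suf[::-1]:
--                 return st + st[:i][::-1]
--     return st
-- ===== Notes on version B (the rewrite author's own statement) =====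
-- stated objective: simpler
-- what changed: Replaces A's insert-into-list-and-recheck-full-palindrome while loop with a single scan for the first palindromic suffix st[i:], returning st + st[:i][::-1] in one concatenation.
import Mathlib
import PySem

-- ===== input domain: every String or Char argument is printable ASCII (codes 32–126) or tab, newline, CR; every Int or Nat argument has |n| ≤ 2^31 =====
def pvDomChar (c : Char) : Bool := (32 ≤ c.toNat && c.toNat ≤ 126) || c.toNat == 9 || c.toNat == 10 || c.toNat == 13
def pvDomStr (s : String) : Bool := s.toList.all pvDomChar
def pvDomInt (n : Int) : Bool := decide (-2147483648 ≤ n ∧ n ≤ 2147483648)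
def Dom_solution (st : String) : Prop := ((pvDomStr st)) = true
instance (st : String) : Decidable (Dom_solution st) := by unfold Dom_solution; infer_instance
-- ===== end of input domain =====

-- B mirrors the shortest prefix whose removal leaves a palindromic suffix (one scan + one concatenation)
-- instead of A's insert-one-char-and-recheck-the-whole-list loop; same value everywhere, plainer code.

-- ===== PORT A =====
-- while w[:] != w[::-1]: w.insert(len(w)-i, w[i]); i += 1
-- ported with a fuel parameter (fuel = len(w) provably suffices, see lemma solutionLoopA_eq_scan below);
-- the fuel-exhausted and IndexError branches return w and are never reached on the states A produces.
def solutionLoopA : Nat → List Char → Nat → List Char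
  | 0, w, _ => w
  | fuel + 1, w, i =>
    if w = w.reverse then w
    else
      match PySem.List.pyGet? w (i : Int) with
      | none => w
      | some c => solutionLoopA fuel (PySem.List.insert w ((w.length : Int) - (i : Int)) c) (i + 1)

def solution (st : String) : String :=
  let w := st.toList
  let ale := w.length
  if 3 ≤ ale ∧ ale ≤ 10 then String.mk (solutionLoopA ale w 0) else st

-- ===== PORT B =====
-- for i in range(len(st)): if st[i:] == st[i:][::-1]: return st + st[:i][::-1]
def solutionScanB (s : List Char) (i : Nat) : List Char :=
  if h : i < s.length then
    if s.drop i = (s.drop i).reverse then s ++ (s.take i).reverse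
    else solutionScanB s (i + 1)
  else s
termination_by s.length - i

def solution_alt (st : String) : String :=
  let s := st.toList
  if 3 ≤ s.length ∧ s.length ≤ 10 then String.mk (solutionScanB s 0) else st

-- ===== PRECONDITION & SPEC =====
def Spec_solution (st : String) (out : String) : Prop := out = solution_alt st
instance (st : String) (out : String) : Decidable (Spec_solution st out) := by unfold Spec_solution; infer_instance

-- ===== CLAIM (what is proved, stated in full; the proofs are below) =====
def Claim_equal_solution : Prop := ∀ (st : String), Dom_solution st → Spec_solution st (solution st)

-- ===== LEMMAS AND PROOFS =====

-- a list of length ≤ 1 is its own reverse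
lemma short_pal (l : List Char) (h : l.length ≤ 1) : l = l.reverse := by
  match l, h with
  | [], _ => rfl
  | [a], _ => rfl

-- the loop state s ++ (take i s).reverse is a palindrome iff the suffix drop i s is
lemma pal_iff (s : List Char) (i : Nat) :
    (s ++ (s.take i).reverse = (s ++ (s.take i).reverse).reverse) ↔
      (s.drop i = (s.drop i).reverse) := by
  conv_lhs => rw [List.reverse_append, List.reverse_reverse,
    show s ++ (s.take i).reverse = s.take i ++ (s.drop i ++ (s.take i).reverse) by
      rw [← List.append_assoc, List.take_append_drop],
    show s.reverse = (s.drop i).reverse ++ (s.take i).reverse by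
      rw [← List.reverse_append, List.take_append_drop]]
  constructor
  · intro h
    have h2 := List.append_cancel_left h
    exact List.append_cancel_right h2
  · intro h
    rw [← h]

-- one loop step of A turns state i into state i+1
lemma step_state (s : List Char) (i : Nat) (hi : i < s.length) :
    PySem.List.insert (s ++ (s.take i).reverse)
        (((s ++ (s.take i).reverse).length : Int) - (i : Int)) s[i]
      = s ++ (s.take (i + 1)).reverse := by
  have hlen : (s ++ (s.take i).reverse).length = s.length + i := by
    simp [List.length_take, Nat.min_eq_left (Nat.le_of_lt hi)]
  have hcast : ((s ++ (s.take i).reverse).length : Int) - (i : Int) = ((s.length : Nat) : Int) := by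
    rw [hlen]; push_cast; ring
  rw [hcast, PySem.List.insert_natCast _ _ _ (by simp [hlen])]
  have htake : (s ++ (s.take i).reverse).take s.length = s := by
    simp
  have hdrop : (s ++ (s.take i).reverse).drop s.length = (s.take i).reverse := by
    simp
  have hsucc : s.take (i + 1) = s.take i ++ [s[i]] := by
    rw [List.take_add_one, List.getElem?_eq_getElem hi]; rfl
  rw [htake, hdrop, hsucc, List.reverse_append, List.reverse_singleton, List.singleton_append]

lemma solutionLoopA_eq_scan (s : List Char) :
    ∀ fuel i, i < s.length → s.length - i ≤ fuel →
      solutionLoopA fuel (s ++ (s.take i).reverse) i = solutionScanB s i := by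
  intro fuel
  induction fuel with
  | zero => intro i hi hf; omega
  | succ fuel ih =>
    intro i hi hf
    rw [solutionLoopA, solutionScanB]
    rw [dif_pos hi]
    by_cases hp : s.drop i = (s.drop i).reverse
    · rw [if_pos ((pal_iff s i).mpr hp), if_pos hp]
    · rw [if_neg (fun h => hp ((pal_iff s i).mp h)), if_neg hp]
      have hget : PySem.List.pyGet? (s ++ (s.take i).reverse) (i : Int)
          = some s[i] := by
        rw [PySem.List.pyGet?_natCast, List.getElem?_append_left hi,
          List.getElem?_eq_getElem hi]
      simp only [hget]
      rw [step_state s i hi]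
      -- drop i s is not a palindrome, so it has length ≥ 2, hence i + 1 < s.length
      have hlen2 : i + 1 < s.length := by
        by_contra hc
        exact hp (short_pal _ (by simp [List.length_drop]; omega))
      exact ih (i + 1) hlen2 (by omega)

-- ===== VERDICT (by name: the statement is the Claim_ definition above) =====
theorem solution_spec : Claim_equal_solution := by
  intro st _
  unfold Spec_solution solution solution_alt
  by_cases h : 3 ≤ st.toList.length ∧ st.toList.length ≤ 10
  · rw [if_pos h, if_pos h]
    have := solutionLoopA_eq_scan st.toList st.toList.length 0 (by omega) (by omega)
    exact congrArg String.mk (by simpa using this)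
  · rw [if_neg h, if_neg h]
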